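-- pv_equiv track=rewrite | github.com/LKrysik/FX_code_AI | src/data/data_quality_service.py | _check_timestamp_ordering
-- ===== SOURCE A (Python) =====
-- from typing import Dict, List, Any, Optional, Tuple
--
-- def _check_timestamp_ordering(data_points: List[Dict[str, Any]]) -> int:
--     """Check for timestamp ordering issues"""
--     if not data_points:
--         return 0
--
--     issues = 0
--     previous_time = None
--
--     for point in data_points:
--         current_time = point.get('timestamp')
--         if current_time is None:
--             issues += 1
--             continue
--
--         if previous_time is not None and current_time < previous_time:
--             issues += 1
--
--         previous_time = current_time
--
--     return issues
-- ===== SOURCE B (Python) =====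
-- def _check_timestamp_ordering(data_points):
--     """Check for timestamp ordering issues"""
--     nulls = sum(1 for p in data_points if p.get('timestamp') is None)
--     times = [t for p in data_points if (t := p.get('timestamp')) is not None]
--     disorder = sum(1 for prev, cur in zip(times, times[1:]) if cur < prev)
--     return nulls + disorder
-- ===== Notes on version B (the rewrite author's own statement) =====
-- stated objective: alternative
-- what changed: Replaces the single fused stateful scan (issues counter plus previous_time carried across the loop with continue) by three independent passes: count the null timestamps, build the filtered list of non-null timestamps, then count out-of-order adjacent pairs of that list with zip.
import Mathlib
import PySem

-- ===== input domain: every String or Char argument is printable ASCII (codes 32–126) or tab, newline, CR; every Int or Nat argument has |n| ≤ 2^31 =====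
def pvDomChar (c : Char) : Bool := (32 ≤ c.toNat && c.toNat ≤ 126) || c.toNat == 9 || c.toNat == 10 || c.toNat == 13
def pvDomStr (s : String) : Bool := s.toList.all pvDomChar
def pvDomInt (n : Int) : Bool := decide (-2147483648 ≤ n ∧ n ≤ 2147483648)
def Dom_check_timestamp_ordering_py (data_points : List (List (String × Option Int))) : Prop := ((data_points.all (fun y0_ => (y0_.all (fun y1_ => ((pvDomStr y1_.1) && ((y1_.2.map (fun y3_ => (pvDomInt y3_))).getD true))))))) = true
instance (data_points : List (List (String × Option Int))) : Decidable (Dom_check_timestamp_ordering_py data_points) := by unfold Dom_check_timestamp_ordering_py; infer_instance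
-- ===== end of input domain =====

-- B is a structurally different decomposition (three independent passes instead of one fused
-- stateful scan); same O(n) cost, no speed claimed.

-- point.get('timestamp'): first match in the association list; a missing key and a stored
-- Python None both yield none (hence the .join).
def pvGetTs (point : List (String × Option Int)) : Option Int :=
  ((PySem.Dict.mk point).get? "timestamp").join

-- ===== PORT A =====
def check_timestamp_ordering_py (data_points : List (List (String × Option Int))) : Int :=
  if data_points = [] then 0
  else
    (data_points.foldl
      (fun (st : Int × Option Int) point =>
        match pvGetTs point with
        | none => (st.1 + 1, st.2)        -- issues += 1; continue
        | some t =>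
          match st.2 with
          | some prev => (if t < prev then st.1 + 1 else st.1, some t)
          | none => (st.1, some t))
      (0, none)).1

-- ===== PORT B =====
def check_timestamp_ordering_py_alt (data_points : List (List (String × Option Int))) : Int :=
  let nulls : Int := (data_points.countP (fun p => pvGetTs p = none)) -- sum(1 for …)
  let times : List Int := data_points.filterMap pvGetTs
  let disorder : Int := ((times.zip times.tail).countP (fun pc => decide (pc.2 < pc.1)))
  nulls + disorder

-- ===== PRECONDITION & SPEC =====
def Spec_check_timestamp_ordering_py (data_points : List (List (String × Option Int))) (out : Int) : Prop := out = check_timestamp_ordering_py_alt data_points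
instance (data_points : List (List (String × Option Int))) (out : Int) : Decidable (Spec_check_timestamp_ordering_py data_points out) := by unfold Spec_check_timestamp_ordering_py; infer_instance

-- ===== CLAIM (what is proved, stated in full; the proofs are below) =====
def Claim_equal_check_timestamp_ordering_py : Prop := ∀ (data_points : List (List (String × Option Int))), Dom_check_timestamp_ordering_py data_points → Spec_check_timestamp_ordering_py data_points (check_timestamp_ordering_py data_points)

-- ===== LEMMAS AND PROOFS =====

-- number of out-of-order adjacent pairs
def pvBad : List Int → Int
  | a :: b :: r => (if b < a then 1 else 0) + pvBad (b :: r)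
  | _ => 0

def pvOptCons : Option Int → List Int → List Int
  | none, l => l
  | some x, l => x :: l

theorem pvBad_eq_countP (ts : List Int) :
    ((ts.zip ts.tail).countP (fun pc => decide (pc.2 < pc.1)) : Int) = pvBad ts := by
  induction ts with
  | nil => simp [pvBad]
  | cons a r ih =>
    cases r with
    | nil => simp [pvBad]
    | cons b r' =>
      simp only [List.tail_cons, List.zip_cons_cons, List.countP_cons, pvBad,
        decide_eq_true_eq]
      rw [← ih]
      simp only [List.tail_cons]
      split_ifs with h <;> push_cast <;> omega

theorem pvLoop_eq (dps : List (List (String × Option Int))) (issues : Int) (prev : Option Int) :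
    (dps.foldl
      (fun (st : Int × Option Int) point =>
        match pvGetTs point with
        | none => (st.1 + 1, st.2)
        | some t =>
          match st.2 with
          | some p => (if t < p then st.1 + 1 else st.1, some t)
          | none => (st.1, some t))
      (issues, prev)).1
    = issues + (dps.countP (fun p => pvGetTs p = none))
        + pvBad (pvOptCons prev (dps.filterMap pvGetTs)) := by
  induction dps generalizing issues prev with
  | nil => cases prev <;> simp [pvOptCons, pvBad]
  | cons p r ih =>
    simp only [List.foldl_cons, List.countP_cons, List.filterMap_cons]
    cases hts : pvGetTs p with
    | none =>
      simp only [hts]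
      rw [ih]
      simp
      omega
    | some t =>
      simp only [hts]
      cases prev with
      | none =>
        rw [ih]
        simp [pvOptCons]
      | some pv =>
        rw [ih]
        simp [pvOptCons, pvBad]
        split_ifs <;> omega

-- ===== VERDICT (by name: the statement is the Claim_ definition above) =====
theorem check_timestamp_ordering_py_spec : Claim_equal_check_timestamp_ordering_py := by
  intro dps _
  unfold Spec_check_timestamp_ordering_py check_timestamp_ordering_py check_timestamp_ordering_py_alt
  simp only [pvBad_eq_countP]
  cases dps with
  | nil => simp [pvBad]
  | cons p r =>
    simp only [if_neg (List.cons_ne_nil p r)]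
    rw [pvLoop_eq]
    simp [pvOptCons]
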